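-- pv_equiv track=rewrite | github.com/CongyingXU/CodeMiningTeam_Tasks | CVE_HW_DatasetComparison/AnalyseComparedData/AnalyseNVDvsCVEdetails.py | case5_3
-- ===== SOURCE A (Python) =====
-- def case5_3(CVEurl_list, Snykurl_list):
--     if not Snykurl_list:
--         return False
--     elif not CVEurl_list:
--         return True
--     else:
--         CVEurl_list = sorted(set(CVEurl_list))
--         Snykurl_list = sorted(set(Snykurl_list))
--         for url in CVEurl_list:
--             if url in Snykurl_list:
--                 continue
--             else:
--                 return False
--         return True
-- ===== SOURCE B (Python) =====
-- def case5_3(CVEurl_list, Snykurl_list):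
--     if not Snykurl_list:
--         return False
--     if not CVEurl_list:
--         return True
--     cve = sorted(set(CVEurl_list))
--     snyk = sorted(set(Snykurl_list))
--     it = iter(snyk)
--     v = next(it, None)
--     for u in cve:
--         while v is not None and v < u:
--             v = next(it, None)
--         if v != u:
--             return False
--     return True
-- ===== Notes on version B (the rewrite author's own statement) =====
-- stated objective: alternative
-- what changed: Replaces A's per-element membership scan of the sorted Snyk list with a single two-pointer merge walk over both sorted deduplicated lists, advancing an iterator over snyk monotonically.
import Mathlib
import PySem

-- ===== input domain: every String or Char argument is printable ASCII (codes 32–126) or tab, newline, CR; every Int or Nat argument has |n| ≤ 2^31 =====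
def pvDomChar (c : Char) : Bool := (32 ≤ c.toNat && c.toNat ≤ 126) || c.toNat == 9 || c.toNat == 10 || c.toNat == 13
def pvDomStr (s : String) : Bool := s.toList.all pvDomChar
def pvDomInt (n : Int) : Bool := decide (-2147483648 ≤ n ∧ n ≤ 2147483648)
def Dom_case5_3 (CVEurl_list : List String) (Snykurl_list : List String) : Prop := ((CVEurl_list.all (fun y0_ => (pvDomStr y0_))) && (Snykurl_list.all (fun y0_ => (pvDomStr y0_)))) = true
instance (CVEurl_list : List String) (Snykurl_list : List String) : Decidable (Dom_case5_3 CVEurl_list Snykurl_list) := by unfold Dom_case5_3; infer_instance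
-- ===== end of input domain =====

-- B replaces A's per-url membership scan of the sorted Snyk list by a single
-- two-pointer merge walk over both sorted deduplicated lists (objective: alternative).

-- ===== PORT A =====
-- the 'for url in …: if url in …: continue else: return False' loop of A
def goA (snyk : List String) : List String → Bool
  | [] => true
  | url :: rest => if snyk.contains url then goA snyk rest else false

def case5_3 (CVEurl_list : List String) (Snykurl_list : List String) : Bool :=
  if Snykurl_list = [] then false
  else if CVEurl_list = [] then true
  else
    let c := PySem.List.sorted (PySem.Set.ofList CVEurl_list) (fun x => x) false
    let s := PySem.List.sorted (PySem.Set.ofList Snykurl_list) (fun x => x) false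
    goA s c

-- ===== PORT B =====
-- the 'while v is not None and v < u: v = next(it, None)' loop of B; the iterator
-- state is the remaining suffix of snyk, whose head is the current value v (none when exhausted)
def skipB (u : String) : List String → List String
  | [] => []
  | v :: vs => if v < u then skipB u vs else v :: vs

-- the 'for u in cve' loop of B: skip, then 'if v != u: return False'
def walkB : List String → List String → Bool
  | [], _ => true
  | u :: cs, s =>
    let s' := skipB u s
    if s'.head? = some u then walkB cs s' else false

def case5_3_alt (CVEurl_list : List String) (Snykurl_list : List String) : Bool :=
  if Snykurl_list = [] then false
  else if CVEurl_list = [] then true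
  else
    let cve := PySem.List.sorted (PySem.Set.ofList CVEurl_list) (fun x => x) false
    let snyk := PySem.List.sorted (PySem.Set.ofList Snykurl_list) (fun x => x) false
    walkB cve snyk

-- ===== PRECONDITION & SPEC =====
def Spec_case5_3 (CVEurl_list : List String) (Snykurl_list : List String) (out : Bool) : Prop := out = case5_3_alt CVEurl_list Snykurl_list
instance (CVEurl_list : List String) (Snykurl_list : List String) (out : Bool) : Decidable (Spec_case5_3 CVEurl_list Snykurl_list out) := by unfold Spec_case5_3; infer_instance

-- ===== CLAIM (what is proved, stated in full; the proofs are below) =====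
def Claim_equal_case5_3 : Prop := ∀ (CVEurl_list : List String) (Snykurl_list : List String), Dom_case5_3 CVEurl_list Snykurl_list → Spec_case5_3 CVEurl_list Snykurl_list (case5_3 CVEurl_list Snykurl_list)

-- ===== LEMMAS AND PROOFS =====

theorem goA_eq_all (snyk : List String) (c : List String) :
    goA snyk c = c.all (fun u => snyk.contains u) := by
  induction c with
  | nil => rfl
  | cons u rest ih => simp [goA, ih]

theorem skipB_sublist (u : String) (s : List String) : (skipB u s).Sublist s := by
  induction s with
  | nil => simp [skipB]
  | cons v vs ih =>
    simp only [skipB]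
    split
    · exact ih.cons v
    · exact List.Sublist.refl _

theorem skipB_head_eq_iff_mem (u : String) (s : List String)
    (hs : s.Pairwise (· < ·)) : ((skipB u s).head? = some u) ↔ u ∈ s := by
  induction s with
  | nil => simp [skipB]
  | cons v vs ih =>
    rcases List.pairwise_cons.mp hs with ⟨hv, hvs⟩
    simp only [skipB]
    split
    · rename_i hlt
      rw [ih hvs]
      have : v ≠ u := by intro h; subst h; exact lt_irrefl _ hlt
      simp [List.mem_cons, this.symm]
    · rename_i hnlt
      simp only [List.head?_cons, Option.some.injEq, List.mem_cons]
      constructor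
      · intro h; exact Or.inl h.symm
      · rintro (h | h)
        · exact h.symm
        · exact absurd (hv u h) hnlt
  
theorem mem_skipB_of_gt (u x : String) (s : List String) (hux : u < x) :
    (x ∈ skipB u s) ↔ x ∈ s := by
  induction s with
  | nil => simp [skipB]
  | cons v vs ih =>
    simp only [skipB]
    split
    · rename_i hlt
      have hvx : v ≠ x := by intro h; subst h; exact absurd (lt_trans hlt hux) (lt_irrefl _)
      simp [ih, List.mem_cons, hvx.symm]
    · rfl

theorem all_congr_mem {α : Type} (l : List α) (f g : α → Bool)
    (h : ∀ x ∈ l, f x = g x) : l.all f = l.all g := by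
  induction l with
  | nil => rfl
  | cons a t ih =>
    simp only [List.all_cons, h a (List.mem_cons_self), ih (fun x hx => h x (List.mem_cons_of_mem a hx))]

theorem walkB_eq_all (c : List String) : ∀ (s : List String),
    c.Pairwise (· < ·) → s.Pairwise (· < ·) →
    walkB c s = c.all (fun u => s.contains u) := by
  induction c with
  | nil => intro s _ _; rfl
  | cons u cs ih =>
    intro s hc hs
    rcases List.pairwise_cons.mp hc with ⟨hu, hcs⟩
    simp only [walkB, List.all_cons]
    by_cases h : (skipB u s).head? = some u
    · have hmem : u ∈ s := (skipB_head_eq_iff_mem u s hs).mp h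
      have hs' : (skipB u s).Pairwise (· < ·) := hs.sublist (skipB_sublist u s)
      rw [if_pos h, ih (skipB u s) hcs hs']
      have : cs.all (fun x => (skipB u s).contains x) = cs.all (fun x => s.contains x) := by
        apply all_congr_mem
        intro x hx
        simp only [List.contains_eq_mem, decide_eq_decide]
        exact mem_skipB_of_gt u x s (hu x hx)
      rw [this]
      simp [List.contains_eq_mem, hmem]
    · have hmem : u ∉ s := fun hm => h ((skipB_head_eq_iff_mem u s hs).mpr hm)
      rw [if_neg h]
      simp [List.contains_eq_mem, hmem]

-- ===== VERDICT (by name: the statement is the Claim_ definition above) =====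
theorem case5_3_spec : Claim_equal_case5_3 := by
  intro cve snyk _
  unfold Spec_case5_3 case5_3 case5_3_alt
  by_cases h1 : snyk = []
  · simp [h1]
  · by_cases h2 : cve = []
    · simp [h1, h2]
    · simp only [h1, h2, if_false]
      rw [goA_eq_all, walkB_eq_all _ _
        (PySem.List.sorted_ofList_pairwise_lt cve)
        (PySem.List.sorted_ofList_pairwise_lt snyk)]
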